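-- pv_equiv track=rewrite | github.com/scerka/cdr-parser | python/huawei_parser.py | bcdToString
-- ===== SOURCE A (Python) =====
-- def bcdToString(bcdbytes):
--     result = []
--     for byte in bcdbytes:
--         # Разбираем байт на две тетрады
--         high = (byte >> 4) & 0x0F
--         low = byte & 0x0F
--
--         # Преобразуем тетрады в символы
--         for nibble in [high, low]:
--             # Отбрасываем 0x0F
--             if nibble != 0x0F:
--                 # Преобразуем в символ (0-9, A-F)
--                 if nibble < 10:
--                     result.append(str(nibble))
--                 else:
--                     # Для значений 10-15 используем буквы A-F
--                     result.append(chr(ord('а') + nibble - 10))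
--
--     return ''.join(result)
-- ===== SOURCE B (Python) =====
-- _TR = str.maketrans('abcde', 'абвгд')
--
-- def bcdToString(bcdbytes):
--     # hex-string pipeline: format each byte as two lowercase hex chars,
--     # drop the 0xF filler nibbles, remap hex letters to the Cyrillic ones
--     s = ''.join(format(b & 0xFF, '02x') for b in bcdbytes)
--     return s.replace('f', '').translate(_TR)
-- ===== Notes on version B (the rewrite author's own statement) =====
-- stated objective: idiomatic
-- what changed: B replaces A's explicit per-nibble bit-shift loop with if/else classification by a string pipeline: format each byte as two lowercase hex chars, strip the 0xF filler with replace, and remap a-e to the Cyrillic letters with str.translate.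
import Mathlib
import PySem

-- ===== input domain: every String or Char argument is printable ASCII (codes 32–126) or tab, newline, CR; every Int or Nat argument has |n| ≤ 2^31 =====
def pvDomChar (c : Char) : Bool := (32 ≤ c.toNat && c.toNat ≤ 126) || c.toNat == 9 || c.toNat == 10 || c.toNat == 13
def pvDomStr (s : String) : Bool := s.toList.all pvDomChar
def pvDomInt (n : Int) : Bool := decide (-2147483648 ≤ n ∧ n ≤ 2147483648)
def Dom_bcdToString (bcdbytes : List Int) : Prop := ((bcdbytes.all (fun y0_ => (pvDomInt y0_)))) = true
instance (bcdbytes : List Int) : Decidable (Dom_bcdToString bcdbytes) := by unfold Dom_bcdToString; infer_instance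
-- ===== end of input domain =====

-- B replaces A's per-nibble bit-shifting loop by a hex-string pipeline (format each byte
-- as two lowercase hex chars, drop 'f', remap 'a'..'e' to the Cyrillic letters): idiomatic, same O(n).

-- ===== PORT A =====
def bcdToString (bcdbytes : List Int) : String :=
  let result := bcdbytes.foldl (fun result byte =>
    let high := PySem.Int.mod (PySem.Int.floordiv byte 16) 16
    let low := PySem.Int.mod byte 16
    [high, low].foldl (fun result nibble =>
      if nibble ≠ 15 then
        if nibble < 10 then result ++ [PySem.Int.toStr nibble]
        else result ++ [String.ofList [Char.ofNat (1072 + nibble - 10).toNat]]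
      else result) result) ([] : List String)
  PySem.Str.join "" result

-- ===== PORT B =====
-- format(b & 0xFF, '02x') ported by hand: the two lowercase hex digits of m = b & 0xFF (exact for 0 ≤ m < 256)
def pvHexDigit (n : Nat) : Char := "0123456789abcdef".toList.getD n '0'
-- str.translate with table {'a'→'а','b'→'б','c'→'в','d'→'г','e'→'д'} ported by hand as a char map (exact)
def pvTr (c : Char) : Char :=
  if c = 'a' then 'а' else if c = 'b' then 'б' else if c = 'c' then 'в'
  else if c = 'd' then 'г' else if c = 'e' then 'д' else c

def bcdToString_alt (bcdbytes : List Int) : String :=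
  let s := bcdbytes.foldl (fun s b =>
    let m := (PySem.Int.mod b 256).toNat
    s ++ [pvHexDigit (m / 16), pvHexDigit (m % 16)]) ([] : List Char)
  -- s.replace('f', '') with a one-char old and empty new drops every 'f': ported as a filter (exact)
  String.ofList ((s.filter (fun c => !(c == 'f'))).map pvTr)

-- ===== PRECONDITION & SPEC =====
def Spec_bcdToString (bcdbytes : List Int) (out : String) : Prop := out = bcdToString_alt bcdbytes
instance (bcdbytes : List Int) (out : String) : Decidable (Spec_bcdToString bcdbytes out) := by unfold Spec_bcdToString; infer_instance

-- ===== CLAIM (what is proved, stated in full; the proofs are below) =====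
def Claim_equal_bcdToString : Prop := ∀ (bcdbytes : List Int), Dom_bcdToString bcdbytes → Spec_bcdToString bcdbytes (bcdToString bcdbytes)

-- ===== LEMMAS AND PROOFS =====

-- A's output for one nibble, and for one byte (as a list of one-char strings)
def nibStrs (n : Int) : List String :=
  if n ≠ 15 then
    if n < 10 then [PySem.Int.toStr n]
    else [String.ofList [Char.ofNat (1072 + n - 10).toNat]]
  else []

def outA (b : Int) : List String :=
  nibStrs (PySem.Int.mod (PySem.Int.floordiv b 16) 16) ++ nibStrs (PySem.Int.mod b 16)

-- B's two hex chars for one byte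
def outB (b : Int) : List Char :=
  [pvHexDigit ((PySem.Int.mod b 256).toNat / 16), pvHexDigit ((PySem.Int.mod b 256).toNat % 16)]

-- the per-byte character contribution both sides turn out to produce
def chA (b : Int) : List Char := ((outA b).map String.toList).flatten
def chB (b : Int) : List Char := ((outB b).filter (fun c => !(c == 'f'))).map pvTr

theorem foldA_eq (l : List Int) : ∀ (acc : List String),
    l.foldl (fun result byte =>
      let high := PySem.Int.mod (PySem.Int.floordiv byte 16) 16
      let low := PySem.Int.mod byte 16
      [high, low].foldl (fun result nibble =>
        if nibble ≠ 15 then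
          if nibble < 10 then result ++ [PySem.Int.toStr nibble]
          else result ++ [String.ofList [Char.ofNat (1072 + nibble - 10).toNat]]
        else result) result) acc = acc ++ l.flatMap outA := by
  induction l with
  | nil => intro acc; simp
  | cons b t ih =>
    intro acc
    rw [List.foldl_cons, ih, List.flatMap_cons]
    have hstep : ∀ (a : List String) (n : Int),
        (if n ≠ 15 then
          if n < 10 then a ++ [PySem.Int.toStr n]
          else a ++ [String.ofList [Char.ofNat (1072 + n - 10).toNat]]
        else a) = a ++ nibStrs n := by
      intro a n; unfold nibStrs; split_ifs <;> simp
    simp only [List.foldl_cons, List.foldl_nil, hstep, outA, List.append_assoc]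

theorem foldB_eq (l : List Int) : ∀ (acc : List Char),
    l.foldl (fun s b =>
      let m := (PySem.Int.mod b 256).toNat
      s ++ [pvHexDigit (m / 16), pvHexDigit (m % 16)]) acc = acc ++ l.flatMap outB := by
  induction l with
  | nil => intro acc; simp
  | cons b t ih =>
    intro acc
    rw [List.foldl_cons, ih, List.flatMap_cons]
    simp only [outB, List.append_assoc]

theorem flatten_intersperse_nil (ps : List (List Char)) :
    (List.intersperse ([] : List Char) ps).flatten = ps.flatten := by
  induction ps with
  | nil => rfl
  | cons a t ih => cases t <;> simp_all [List.intersperse]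

theorem join_nil_eq_flatten (ps : List (List Char)) : PySem.Chars.join [] ps = ps.flatten := by
  simp [PySem.Chars.join, List.intercalate, flatten_intersperse_nil]

theorem A_char (l : List Int) : bcdToString l = String.ofList (l.flatMap chA) := by
  apply String.toList_inj.mp
  simp only [bcdToString, foldA_eq, List.nil_append]
  rw [PySem.Str.toList_join]
  simp only [String.toList_empty, join_nil_eq_flatten]
  induction l with
  | nil => simp
  | cons b t ih => simp [chA, ih]

theorem B_char (l : List Int) : bcdToString_alt l = String.ofList (l.flatMap chB) := by
  simp only [bcdToString_alt, foldB_eq, List.nil_append]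
  congr 1
  induction l with
  | nil => simp
  | cons b t ih => simp [chB, List.filter_append, ih]

theorem nib_eq : ∀ n : Nat, n < 16 →
    (nibStrs (n : Int)).flatMap String.toList
      = ([pvHexDigit n].filter (fun c => !(c == 'f'))).map pvTr := by
  decide

theorem perByte (b : Int) : chA b = chB b := by
  have h16 : (0:Int) < 16 := by norm_num
  have h256 : (0:Int) < 256 := by norm_num
  set m : Nat := (PySem.Int.mod b 256).toNat with hm
  have hH : PySem.Int.mod (PySem.Int.floordiv b 16) 16 = ((m / 16 : Nat) : Int) := by
    rw [hm, PySem.Int.mod_eq_emod_of_pos h16, PySem.Int.floordiv_eq_ediv_of_pos h16,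
        PySem.Int.mod_eq_emod_of_pos h256]
    omega
  have hL : PySem.Int.mod b 16 = ((m % 16 : Nat) : Int) := by
    rw [hm, PySem.Int.mod_eq_emod_of_pos h16, PySem.Int.mod_eq_emod_of_pos h256]
    omega
  have hHlt : m / 16 < 16 := by
    have : m < 256 := by
      rw [hm, PySem.Int.mod_eq_emod_of_pos h256]; omega
    omega
  have hLlt : m % 16 < 16 := Nat.mod_lt _ (by norm_num)
  unfold chA chB outA outB
  rw [hH, hL, ← hm]
  simp only [List.map_append, List.flatten_append, ← List.flatMap_def]
  have e1 := nib_eq (m / 16) hHlt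
  have e2 := nib_eq (m % 16) hLlt
  rw [show [pvHexDigit (m / 16), pvHexDigit (m % 16)]
        = [pvHexDigit (m / 16)] ++ [pvHexDigit (m % 16)] from rfl,
     List.filter_append, List.map_append, e1, e2]

theorem flatMap_ch_eq (l : List Int) : l.flatMap chA = l.flatMap chB := by
  induction l with
  | nil => rfl
  | cons b t ih => simp [perByte, ih]

-- ===== VERDICT (by name: the statement is the Claim_ definition above) =====
theorem bcdToString_spec : Claim_equal_bcdToString := by
  intro l _
  unfold Spec_bcdToString
  rw [A_char, B_char, flatMap_ch_eq]
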